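-- pv_equiv track=rewrite | github.com/charlie-peak-ai/AdventofCode2022 | calendar/5/Supply Stacks.py | _convert_to_stack_dict
-- ===== SOURCE A (Python) =====
-- def _convert_to_stack_dict(parsed_crate_list: list) -> dict:
--     """Converts the parsed lists of strings to dict of lists, reoriented as crate stacks"""
--     stack_dict = {}
--     for i, j in enumerate(zip(*parsed_crate_list), start=1):
--         j = list(map(str.strip, j))
--         j.reverse()
--         j = [entry for entry in j if entry != ""]
--         stack_dict[i] = j
--
--     return stack_dict
-- ===== SOURCE B (Python) =====
-- def _convert_to_stack_dict(parsed_crate_list: list) -> dict: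
--     """Row-major rebuild: walk rows bottom-up and append non-empty cells,
--     instead of transposing with zip."""
--     if not parsed_crate_list:
--         return {}
--     n = min(len(r) for r in parsed_crate_list)
--     stack_dict = {i: [] for i in range(1, n + 1)}
--     for row in reversed(parsed_crate_list):
--         for col in range(n):
--             cell = row[col].strip()
--             if cell != "":
--                 stack_dict[col + 1].append(cell)
--     return stack_dict
-- ===== Notes on version B (the rewrite author's own statement) =====
-- stated objective: alternative
-- what changed: Replaces the column-major transpose (zip(*rows), per-column strip/reverse/filter) by a single row-major pass: pre-initialize the 1..n keys (n = shortest row) and walk the rows bottom-to-top appending each non-empty stripped cell to its column's stack.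
import Mathlib
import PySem

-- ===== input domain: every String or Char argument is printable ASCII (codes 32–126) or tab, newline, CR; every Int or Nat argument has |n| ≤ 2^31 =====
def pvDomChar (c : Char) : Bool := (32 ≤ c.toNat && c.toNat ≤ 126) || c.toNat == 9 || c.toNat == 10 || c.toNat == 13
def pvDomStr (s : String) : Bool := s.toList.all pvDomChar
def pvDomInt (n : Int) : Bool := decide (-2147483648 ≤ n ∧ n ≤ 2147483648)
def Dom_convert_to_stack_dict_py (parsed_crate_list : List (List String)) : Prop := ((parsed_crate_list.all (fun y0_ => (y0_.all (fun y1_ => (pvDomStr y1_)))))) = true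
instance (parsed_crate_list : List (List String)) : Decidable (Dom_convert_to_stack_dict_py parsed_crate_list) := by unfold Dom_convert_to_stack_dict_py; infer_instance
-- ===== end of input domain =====

-- B rebuilds the stack dict in one row-major pass over the rows bottom-to-top
-- (appending non-empty stripped cells) instead of A's column-major transpose with
-- zip(*rows) followed by per-column strip/reverse/filter; same cost, no speed claim.

-- length of the shortest row (zip(*rows) truncation width / min(len(r) for r in rows));
-- 0 for the empty list (where neither Python evaluates it)
def pvMinRowLen : List (List String) → Nat
  | [] => 0
  | r :: rs => rs.foldl (fun m r' => min m r'.length) r.length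

-- ===== PORT A =====
def convert_to_stack_dict_py (parsed_crate_list : List (List String)) : List (Int × List String) :=
  -- zip(*parsed_crate_list), hand-ported: the columns 0..n-1 where n is the shortest
  -- row's length; exact because each index c < n is < every row's length, so the
  -- default "" of the indexing is never used
  let cols : List (List String) :=
    (List.range (pvMinRowLen parsed_crate_list)).map
      (fun c => parsed_crate_list.map (fun r => r[c]?.getD ""))
  ((PySem.List.enumerate cols 1).foldl
    (fun d p =>
      d.insert p.1 (((p.2.map PySem.Str.strip).reverse).filter (fun s => decide (s ≠ ""))))
    PySem.Dict.empty).items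

-- ===== PORT B =====
def convert_to_stack_dict_py_alt (parsed_crate_list : List (List String)) : List (Int × List String) :=
  match parsed_crate_list with
  | [] => []
  | r :: rs =>
    let n : Nat := pvMinRowLen (r :: rs)          -- min(len(r) for r in parsed_crate_list)
    let d0 : PySem.Dict Int (List String) :=      -- {i: [] for i in range(1, n + 1)}
      (PySem.List.pyRange 1 ((n : Int) + 1)).foldl
        (fun d i => d.insert i ([] : List String)) PySem.Dict.empty
    let dfin :=
      (r :: rs).reverse.foldl                     -- for row in reversed(parsed_crate_list)
        (fun d row =>
          (PySem.List.pyRange 0 (n : Int)).foldl  -- for col in range(n)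
            (fun d c =>
              -- row[col]: exact, 0 ≤ c < n ≤ len(row), so pyGetD never uses its default
              let cell := PySem.Str.strip (PySem.List.pyGetD row c "")
              if cell ≠ "" then d.modify (c + 1) [] (· ++ [cell]) else d)
            d)
        d0
    dfin.items

-- ===== PRECONDITION & SPEC =====
def Spec_convert_to_stack_dict_py (parsed_crate_list : List (List String)) (out : List (Int × List String)) : Prop := out = convert_to_stack_dict_py_alt parsed_crate_list
instance (parsed_crate_list : List (List String)) (out : List (Int × List String)) : Decidable (Spec_convert_to_stack_dict_py parsed_crate_list out) := by unfold Spec_convert_to_stack_dict_py; infer_instance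

-- ===== CLAIM (what is proved, stated in full; the proofs are below) =====
def Claim_equal_convert_to_stack_dict_py : Prop := ∀ (parsed_crate_list : List (List String)), Dom_convert_to_stack_dict_py parsed_crate_list → Spec_convert_to_stack_dict_py parsed_crate_list (convert_to_stack_dict_py parsed_crate_list)

-- ===== LEMMAS AND PROOFS =====

-- the common value of both sides: column c (0-based) holds the non-empty stripped
-- cells of that column read bottom-to-top
def pvSpecList (xs : List (List String)) (n : Nat) : List (Int × List String) :=
  (List.range n).map
    (fun (c : Nat) => ((c : Int) + 1,
      (xs.reverse.map (fun r => PySem.Str.strip (r[c]?.getD ""))).filter (fun s => decide (s ≠ ""))))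

-- B's inner/outer loops re-indexed over Nat
def pvStep (row : List String) (d : PySem.Dict Int (List String)) (c : Nat) : PySem.Dict Int (List String) :=
  if PySem.Str.strip (row[c]?.getD "") ≠ "" then
    d.modify ((c : Int) + 1) [] (· ++ [PySem.Str.strip (row[c]?.getD "")])
  else d

def pvInner (row : List String) (n : Nat) (d : PySem.Dict Int (List String)) : PySem.Dict Int (List String) :=
  (List.range n).foldl (pvStep row) d

def pvOuter (rows : List (List String)) (n : Nat) (d : PySem.Dict Int (List String)) : PySem.Dict Int (List String) :=
  rows.foldl (fun d row => pvInner row n d) d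

lemma pvInner_bridge (row : List String) (n : Nat) (d : PySem.Dict Int (List String)) :
    (PySem.List.pyRange 0 (n : Int)).foldl
      (fun d c =>
        let cell := PySem.Str.strip (PySem.List.pyGetD row c "")
        if cell ≠ "" then d.modify (c + 1) [] (· ++ [cell]) else d) d
    = pvInner row n d := by
  rw [PySem.List.pyRange_zero_natCast, List.foldl_map, pvInner]
  exact PySem.List.foldl_congr_mem _ _ _ _ (fun acc x _ => by simp [pvStep])

lemma pvInner_contains (row : List String) (n : Nat) (d : PySem.Dict Int (List String)) (j : Int)
    (h : d.contains j = true) : (pvInner row n d).contains j = true := by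
  induction n generalizing d with
  | zero => simpa [pvInner] using h
  | succ m ih =>
    rw [pvInner, List.range_succ, List.foldl_append]
    show (pvStep row (pvInner row m d) m).contains j = true
    unfold pvStep
    split
    · simp [PySem.Dict.contains_modify, ih d h]
    · exact ih d h

lemma pvInner_keys (row : List String) (n : Nat) (d : PySem.Dict Int (List String))
    (h : ∀ c : Nat, c < n → d.contains ((c : Int) + 1) = true) :
    (pvInner row n d).keys = d.keys := by
  induction n generalizing d with
  | zero => simp [pvInner]
  | succ m ih =>
    rw [pvInner, List.range_succ, List.foldl_append]
    show (pvStep row (pvInner row m d) m).keys = d.keys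
    have hk : ∀ c : Nat, c < m → d.contains ((c : Int) + 1) = true := fun c hc => h c (by omega)
    unfold pvStep
    split
    · rw [PySem.Dict.keys_modify,
        PySem.Dict.keys_insert_of_contains _ _ (pvInner_contains row m d _ (h m (by omega)))]
      exact ih d hk
    · exact ih d hk

lemma pvInner_getD (row : List String) (n : Nat) (d : PySem.Dict Int (List String)) (j : Int) :
    (pvInner row n d).getD j [] =
      d.getD j [] ++
        (if 1 ≤ j ∧ j ≤ (n : Int) ∧ PySem.Str.strip (row[(j - 1).toNat]?.getD "") ≠ "" then
          [PySem.Str.strip (row[(j - 1).toNat]?.getD "")] else []) := by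
  induction n generalizing d with
  | zero =>
    simp only [pvInner, List.range_zero, List.foldl_nil, Nat.cast_zero]
    rw [if_neg (by omega)]
    simp
  | succ m ih =>
    rw [pvInner, List.range_succ, List.foldl_append]
    show (pvStep row (pvInner row m d) m).getD j [] = _
    unfold pvStep
    by_cases hcell : PySem.Str.strip (row[m]?.getD "") ≠ ""
    · rw [if_pos hcell, PySem.Dict.getD_modify]
      by_cases hj : j = (m : Int) + 1
      · subst hj
        rw [if_pos rfl, ih]
        have hm : ((m : Int) + 1 - 1).toNat = m := by omega
        rw [if_neg (by omega), if_pos ⟨by omega, by push_cast; omega, by rw [hm]; exact hcell⟩, hm]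
        simp
      · rw [if_neg hj, ih]
        by_cases hle : 1 ≤ j ∧ j ≤ (m : Int) ∧ PySem.Str.strip (row[(j - 1).toNat]?.getD "") ≠ ""
        · rw [if_pos hle, if_pos ⟨hle.1, by push_cast; omega, hle.2.2⟩]
        · rw [if_neg hle, if_neg (by
            rintro ⟨h1, h2, h3⟩
            exact hle ⟨h1, by push_cast at h2 ⊢; omega, h3⟩)]
    · rw [if_neg hcell, ih]
      by_cases hle : 1 ≤ j ∧ j ≤ (m : Int) ∧ PySem.Str.strip (row[(j - 1).toNat]?.getD "") ≠ ""
      · rw [if_pos hle, if_pos ⟨hle.1, by push_cast; omega, hle.2.2⟩]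
      · rw [if_neg hle, if_neg (by
          rintro ⟨h1, h2, h3⟩
          by_cases hj : j = (m : Int) + 1
          · apply hcell
            have hm : (j - 1).toNat = m := by omega
            rw [hm] at h3
            exact h3
          · exact hle ⟨h1, by push_cast at h2 ⊢; omega, h3⟩)]

lemma pvOuter_keys (rows : List (List String)) (n : Nat) (d : PySem.Dict Int (List String))
    (h : ∀ c : Nat, c < n → d.contains ((c : Int) + 1) = true) :
    (pvOuter rows n d).keys = d.keys := by
  induction rows generalizing d with
  | nil => simp [pvOuter]
  | cons r rs ih =>
    rw [pvOuter, List.foldl_cons]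
    have hstep : List.foldl (fun d row => pvInner row n d) (pvInner r n d) rs
        = pvOuter rs n (pvInner r n d) := rfl
    rw [hstep, ih _ (fun c hc => pvInner_contains r n d _ (h c hc)), pvInner_keys r n d h]

lemma pvOuter_getD (rows : List (List String)) (n : Nat) (c : Nat) (hc : c < n)
    (d : PySem.Dict Int (List String)) :
    (pvOuter rows n d).getD ((c : Int) + 1) [] =
      d.getD ((c : Int) + 1) [] ++
        (rows.map (fun r => PySem.Str.strip (r[c]?.getD ""))).filter (fun s => decide (s ≠ "")) := by
  induction rows generalizing d with
  | nil => simp [pvOuter]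
  | cons r rs ih =>
    rw [pvOuter, List.foldl_cons]
    have hstep : List.foldl (fun d row => pvInner row n d) (pvInner r n d) rs
        = pvOuter rs n (pvInner r n d) := rfl
    rw [hstep, ih, pvInner_getD]
    have h1 : ((c : Int) + 1 - 1).toNat = c := by omega
    rw [h1, List.map_cons, List.filter_cons]
    by_cases hcell : PySem.Str.strip (r[c]?.getD "") ≠ ""
    · rw [if_pos ⟨by omega, by omega, hcell⟩, if_pos (by simpa using hcell)]
      simp
    · rw [if_neg (by rintro ⟨-, -, h3⟩; exact hcell h3),
        if_neg (by simpa using hcell)]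
      simp

-- the initial dict {i: [] for i in range(1, n+1)}
lemma pvD0_items (n : Nat) :
    ((PySem.List.pyRange 1 ((n : Int) + 1)).foldl
        (fun d i => d.insert i ([] : List String)) PySem.Dict.empty).items
      = (PySem.List.pyRange 1 ((n : Int) + 1)).map (fun i => (i, ([] : List String))) := by
  have h := PySem.Dict.items_foldl_insert_fresh (PySem.List.pyRange 1 ((n : Int) + 1))
    (fun i => i) (fun _ => ([] : List String)) PySem.Dict.empty
    (by intro a _; simp [PySem.Dict.contains_empty])
    (by simpa using PySem.List.nodup_pyRange_one 1 ((n : Int) + 1))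
  have hemp : (PySem.Dict.empty : PySem.Dict Int (List String)).items = [] := rfl
  rw [hemp, List.nil_append] at h
  exact h

lemma pvD0_keys (n : Nat) :
    ((PySem.List.pyRange 1 ((n : Int) + 1)).foldl
        (fun d i => d.insert i ([] : List String)) PySem.Dict.empty).keys
      = PySem.List.pyRange 1 ((n : Int) + 1) := by
  show (PySem.Dict.items _).map (·.1) = _
  rw [pvD0_items]
  simp [Function.comp_def]

lemma pvD0_getD (n : Nat) (j : Int) (h1 : 1 ≤ j) (h2 : j ≤ (n : Int)) :
    ((PySem.List.pyRange 1 ((n : Int) + 1)).foldl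
        (fun d i => d.insert i ([] : List String)) PySem.Dict.empty).getD j [] = [] := by
  apply PySem.Dict.getD_of_mem_items
  · rw [pvD0_items]
    exact List.mem_map_of_mem (by rw [PySem.List.mem_pyRange_one]; omega)
  · rw [pvD0_keys]
    exact PySem.List.nodup_pyRange_one _ _

-- B computes pvSpecList
lemma pvAlt_eq_spec (xs : List (List String)) :
    convert_to_stack_dict_py_alt xs = pvSpecList xs (pvMinRowLen xs) := by
  cases xs with
  | nil => simp [convert_to_stack_dict_py_alt, pvSpecList, pvMinRowLen]
  | cons r rs =>
    show (((r :: rs).reverse.foldl _ _ : PySem.Dict Int (List String))).items = _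
    set n := pvMinRowLen (r :: rs) with hn
    set d0 : PySem.Dict Int (List String) :=
      (PySem.List.pyRange 1 ((n : Int) + 1)).foldl
        (fun d i => d.insert i ([] : List String)) PySem.Dict.empty with hd0
    have hbridge :
        (r :: rs).reverse.foldl
          (fun d row =>
            (PySem.List.pyRange 0 (n : Int)).foldl
              (fun d c =>
                let cell := PySem.Str.strip (PySem.List.pyGetD row c "")
                if cell ≠ "" then d.modify (c + 1) [] (· ++ [cell]) else d) d) d0
          = pvOuter (r :: rs).reverse n d0 := by
      rw [pvOuter]
      exact PySem.List.foldl_congr_mem _ _ _ _ (fun d row _ => pvInner_bridge row n d)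
    rw [hbridge]
    have hcont : ∀ c : Nat, c < n → d0.contains ((c : Int) + 1) = true := by
      intro c hc
      rw [PySem.Dict.contains_iff_mem_keys, hd0, pvD0_keys, PySem.List.mem_pyRange_one]
      omega
    have hkeys : (pvOuter (r :: rs).reverse n d0).keys = PySem.List.pyRange 1 ((n : Int) + 1) := by
      rw [pvOuter_keys _ _ _ hcont, hd0, pvD0_keys]
    rw [PySem.Dict.items_eq_map_keys _ (by rw [hkeys]; exact PySem.List.nodup_pyRange_one _ _) [],
      hkeys, PySem.List.pyRange_one]
    have hlen : (((n : Int) + 1) - 1).toNat = n := by omega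
    rw [hlen, List.map_map, pvSpecList]
    apply List.map_congr_left
    intro c hc
    rw [List.mem_range] at hc
    show ((1 : Int) + (c : Int), (pvOuter (r :: rs).reverse n d0).getD (1 + (c : Int)) []) = _
    have hcomm : (1 : Int) + (c : Int) = (c : Int) + 1 := by ring
    rw [hcomm, pvOuter_getD _ _ _ hc, hd0, pvD0_getD n ((c : Int) + 1) (by omega) (by omega)]
    simp

-- A-side: mapping over an enumerate of mapped range indices
lemma pvEnumA {α β : Type} (g : Nat → α) (F : α → β) :
    ∀ (n : Nat) (s : Int),
      (PySem.List.enumerate ((List.range n).map g) s).map (fun p => (p.1, F p.2))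
        = (List.range n).map (fun (c : Nat) => (s + (c : Int), F (g c))) := by
  intro n
  induction n with
  | zero => intro s; simp [PySem.List.enumerate_nil]
  | succ m ih =>
    intro s
    rw [List.range_succ, List.map_append, PySem.List.enumerate_append, List.map_append, ih]
    simp [PySem.List.enumerate_cons, PySem.List.enumerate_nil]

lemma pvA_eq_spec (xs : List (List String)) :
    convert_to_stack_dict_py xs = pvSpecList xs (pvMinRowLen xs) := by
  unfold convert_to_stack_dict_py
  set n := pvMinRowLen xs with hn
  set g : Nat → List String := fun c => xs.map (fun r => r[c]?.getD "") with hg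
  have hfresh := PySem.Dict.items_foldl_insert_fresh
      (PySem.List.enumerate ((List.range n).map g) 1) Prod.fst
      (fun p => ((p.2.map PySem.Str.strip).reverse).filter (fun s => decide (s ≠ "")))
      PySem.Dict.empty
      (by intro a _; simp [PySem.Dict.contains_empty])
      (by rw [PySem.List.map_fst_enumerate]; exact PySem.List.nodup_pyRange_one _ _)
  show (((PySem.List.enumerate ((List.range n).map g) 1).foldl
      (fun d p =>
        d.insert p.1 (((p.2.map PySem.Str.strip).reverse).filter (fun s => decide (s ≠ ""))))
      PySem.Dict.empty)).items = _
  rw [hfresh]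
  have hemp : (PySem.Dict.empty : PySem.Dict Int (List String)).items = [] := rfl
  rw [hemp, List.nil_append]
  refine (pvEnumA g
    (fun j => ((j.map PySem.Str.strip).reverse).filter (fun s => decide (s ≠ ""))) n 1).trans ?_
  rw [pvSpecList]
  apply List.map_congr_left
  intro c hc
  refine Prod.ext (by ring) ?_
  show (((g c).map PySem.Str.strip).reverse).filter _ = _
  rw [hg]
  simp [List.map_reverse, List.map_map, Function.comp_def]

-- ===== VERDICT (by name: the statement is the Claim_ definition above) =====
theorem convert_to_stack_dict_py_spec : Claim_equal_convert_to_stack_dict_py := by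
  intro xs _
  show convert_to_stack_dict_py xs = convert_to_stack_dict_py_alt xs
  rw [pvA_eq_spec, pvAlt_eq_spec]
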